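-- pv_equiv track=rewrite | github.com/fajran/daluang | daluang/parser.py | __parse_preformatted
-- ===== SOURCE A (Python) =====
-- def __parse_preformatted(text):
-- 	lines = text.splitlines()
-- 	result = ""
--
-- 	inside = False
-- 	for line in lines:
-- 		if line.startswith(' ') and not inside:
-- 			inside = True
-- 			result += "<pre>\n" + line[1:] + "\n"
--
-- 		elif inside and not line.startswith(' '):
-- 			inside = False
-- 			result += "</pre>" + "\n" + line + "\n"
--
-- 		elif inside:
-- 			result += line[1:] + "\n"
--
-- 		else:
-- 			result += line + "\n"
--
-- 	return result
-- ===== SOURCE B (Python) =====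
-- def _runs(lines):
--     # Split lines into maximal runs of equal indentedness: [(indented, [lines...]), ...]
--     if not lines:
--         return []
--     ind = lines[0].startswith(' ')
--     i = 1
--     while i < len(lines) and lines[i].startswith(' ') == ind:
--         i += 1
--     return [(ind, lines[:i])] + _runs(lines[i:])
--
--
-- def __parse_preformatted(text):
--     parts = []
--     prev = False
--     for ind, run in _runs(text.splitlines()):
--         if ind:
--             parts.append("<pre>\n")
--             parts.extend(l[1:] + "\n" for l in run)
--         else:
--             if prev:
--                 parts.append("</pre>\n")
--             parts.extend(l + "\n" for l in run)
--         prev = ind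
--     return "".join(parts)
-- ===== Notes on version B (the rewrite author's own statement) =====
-- stated objective: alternative
-- what changed: Replaces A's single stateful line loop (an 'inside' flag toggled per line) with a run decomposition: lines are first grouped into maximal runs of equal indentedness, then each run is emitted as a whole block, prepending the closing pre tag to a non-indented run when the previous run was indented; pieces are collected in a list and joined once.
import Mathlib
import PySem

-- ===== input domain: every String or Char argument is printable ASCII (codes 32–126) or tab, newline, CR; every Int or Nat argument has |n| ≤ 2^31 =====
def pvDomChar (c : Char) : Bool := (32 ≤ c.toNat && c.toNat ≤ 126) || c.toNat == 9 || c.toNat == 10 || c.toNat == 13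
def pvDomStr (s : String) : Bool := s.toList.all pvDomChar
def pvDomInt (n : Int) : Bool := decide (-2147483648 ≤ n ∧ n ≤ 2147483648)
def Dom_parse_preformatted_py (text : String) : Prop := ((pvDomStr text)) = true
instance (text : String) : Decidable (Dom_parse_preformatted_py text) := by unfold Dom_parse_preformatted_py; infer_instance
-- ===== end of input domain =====

-- B replaces A's stateful line-by-line flag loop with a run decomposition (group consecutive
-- lines by indentedness, then emit each run as a block); same return value, alternative structure.

-- ===== PORT A =====
-- A's loop body: state = (result, inside)
def stepA (st : List Char × Bool) (line : List Char) : List Char × Bool :=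
  if PySem.Chars.startswith line [' '] && !st.2 then
    (st.1 ++ "<pre>\n".toList ++ PySem.List.slice line (some 1) none ++ ['\n'], true)
  else if st.2 && !PySem.Chars.startswith line [' '] then
    (st.1 ++ "</pre>".toList ++ ['\n'] ++ line ++ ['\n'], false)
  else if st.2 then
    (st.1 ++ PySem.List.slice line (some 1) none ++ ['\n'], st.2)
  else
    (st.1 ++ line ++ ['\n'], st.2)

def parse_preformatted_py (text : String) : String :=
  let lines := (PySem.Str.splitlines text).map String.toList
  String.ofList (lines.foldl stepA ([], false)).1

-- ===== PORT B =====
-- B's helper _runs: maximal runs of lines with equal indentedness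
def runsOf (lines : List (List Char)) : List (Bool × List (List Char)) :=
  match lines with
  | [] => []
  | l :: ls =>
    let ind := PySem.Chars.startswith l [' ']
    (ind, l :: ls.takeWhile (fun x => PySem.Chars.startswith x [' '] == ind)) ::
      runsOf (ls.dropWhile (fun x => PySem.Chars.startswith x [' '] == ind))
termination_by lines.length
decreasing_by
  simpa using Nat.lt_succ_of_le (ls.length_dropWhile_le _)

-- B's loop body over runs: state = (parts, prev)
def stepB (st : List (List Char) × Bool) (pr : Bool × List (List Char)) :
    List (List Char) × Bool :=
  if pr.1 then
    (st.1 ++ ["<pre>\n".toList] ++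
       pr.2.map (fun l => PySem.List.slice l (some 1) none ++ ['\n']), pr.1)
  else
    ((if st.2 then st.1 ++ ["</pre>\n".toList] else st.1) ++
       pr.2.map (fun l => l ++ ['\n']), pr.1)

def parse_preformatted_py_alt (text : String) : String :=
  let lines := (PySem.Str.splitlines text).map String.toList
  String.ofList (PySem.Chars.join [] ((runsOf lines).foldl stepB ([], false)).1)

-- ===== PRECONDITION & SPEC =====
def Spec_parse_preformatted_py (text : String) (out : String) : Prop := out = parse_preformatted_py_alt text
instance (text : String) (out : String) : Decidable (Spec_parse_preformatted_py text out) := by unfold Spec_parse_preformatted_py; infer_instance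

-- ===== CLAIM (what is proved, stated in full; the proofs are below) =====
def Claim_equal_parse_preformatted_py : Prop := ∀ (text : String), Dom_parse_preformatted_py text → Spec_parse_preformatted_py text (parse_preformatted_py text)

-- ===== LEMMAS AND PROOFS =====

-- the suffix A's loop appends to `result` when started with flag `inside`
def auxA (inside : Bool) : List (List Char) → List Char
  | [] => []
  | l :: ls =>
    (if PySem.Chars.startswith l [' '] && !inside then
       "<pre>\n".toList ++ PySem.List.slice l (some 1) none ++ ['\n']
     else if inside && !PySem.Chars.startswith l [' '] then
       "</pre>".toList ++ ['\n'] ++ l ++ ['\n']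
     else if inside then PySem.List.slice l (some 1) none ++ ['\n']
     else l ++ ['\n']) ++ auxA (PySem.Chars.startswith l [' ']) ls

lemma foldA_eq : ∀ (ls : List (List Char)) (acc : List Char) (b : Bool),
    (ls.foldl stepA (acc, b)).1 = acc ++ auxA b ls := by
  intro ls
  induction ls with
  | nil => intro acc b; simp [auxA]
  | cons l ls ih =>
    intro acc b
    cases hsw : PySem.Chars.startswith l [' '] <;> cases b <;>
      simp [List.foldl_cons, stepA, auxA, hsw, ih, List.append_assoc]

-- the text B's run loop appends, as a flat char list
def auxB (prev : Bool) : List (Bool × List (List Char)) → List Char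
  | [] => []
  | pr :: rs =>
    (if pr.1 then
       "<pre>\n".toList ++
         (pr.2.map (fun l => PySem.List.slice l (some 1) none ++ ['\n'])).flatten
     else
       (if prev then "</pre>\n".toList else []) ++
         (pr.2.map (fun l => l ++ ['\n'])).flatten) ++ auxB pr.1 rs

lemma foldB_eq : ∀ (rs : List (Bool × List (List Char))) (parts : List (List Char)) (prev : Bool),
    ((rs.foldl stepB (parts, prev)).1).flatten = parts.flatten ++ auxB prev rs := by
  intro rs
  induction rs with
  | nil => intro parts prev; simp [auxB]
  | cons pr rs ih =>
    intro parts prev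
    cases hind : pr.1 <;> cases prev <;>
      simp [List.foldl_cons, stepB, auxB, hind, ih, List.append_assoc]

lemma join_nil_eq_flatten (parts : List (List Char)) :
    PySem.Chars.join [] parts = parts.flatten := by
  induction parts with
  | nil => rfl
  | cons p ps ih =>
    cases ps with
    | nil => simp [PySem.Chars.join, List.intercalate]
    | cons q qs =>
      simp [PySem.Chars.join, List.intercalate] at *
      simpa using ih

-- a run of indented lines, entered with inside = true, is emitted line-by-line bodies
lemma auxA_true_run : ∀ (run rest : List (List Char)),
    (∀ x ∈ run, PySem.Chars.startswith x [' '] = true) →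
    auxA true (run ++ rest) =
      (run.map (fun l => PySem.List.slice l (some 1) none ++ ['\n'])).flatten ++ auxA true rest := by
  intro run
  induction run with
  | nil => intro rest _; simp
  | cons l run ih =>
    intro rest h
    have hl := h l (by simp)
    simp [auxA, hl, ih rest (fun x hx => h x (by simp [hx])), List.append_assoc]

-- a run of non-indented lines, entered with inside = false, is emitted verbatim
lemma auxA_false_run : ∀ (run rest : List (List Char)),
    (∀ x ∈ run, PySem.Chars.startswith x [' '] = false) →
    auxA false (run ++ rest) =
      (run.map (fun l => l ++ ['\n'])).flatten ++ auxA false rest := by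
  intro run
  induction run with
  | nil => intro rest _; simp
  | cons l run ih =>
    intro rest h
    have hl := h l (by simp)
    simp [auxA, hl, ih rest (fun x hx => h x (by simp [hx])), List.append_assoc]

lemma head_dropWhile_false {p : List Char → Bool} {l : List (List Char)} {x : List Char}
    {xs : List (List Char)} (h : l.dropWhile p = x :: xs) : p x = false := by
  have := List.head?_dropWhile_not p l
  rw [h] at this; simpa using this

lemma main_eq : ∀ (n : Nat) (lines : List (List Char)) (b : Bool),
    lines.length ≤ n →
    (b = true → ∀ l ∈ lines.head?, PySem.Chars.startswith l [' '] = false) →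
    auxA b lines = auxB b (runsOf lines) := by
  intro n
  induction n with
  | zero =>
    intro lines b hlen _
    have : lines = [] := List.eq_nil_of_length_eq_zero (Nat.le_zero.mp hlen)
    subst this; simp [runsOf, auxA, auxB]
  | succ n ih =>
    intro lines b hlen hb
    cases lines with
    | nil => simp [runsOf, auxA, auxB]
    | cons l ls =>
      cases hsw : PySem.Chars.startswith l [' '] with
      | true =>
        -- b must be false (an indented line cannot follow a non-indented run with b = true…
        -- rather: hb forbids b = true here)
        have hbf : b = false := by
          cases b with
          | false => rfl
          | true => exact absurd (hb rfl l (by simp)) (by simp [hsw])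
        subst hbf
        have hsplit := List.takeWhile_append_dropWhile
          (p := fun x => PySem.Chars.startswith x [' '] == true) (l := ls)
        have hrun : ∀ x ∈ ls.takeWhile (fun x => PySem.Chars.startswith x [' '] == true),
            PySem.Chars.startswith x [' '] = true := by
          intro x hx; simpa using List.mem_takeWhile_imp hx
        have hrest : ∀ x ∈ (ls.dropWhile (fun x => PySem.Chars.startswith x [' '] == true)).head?,
            PySem.Chars.startswith x [' '] = false := by
          intro x hx
          cases hd : ls.dropWhile (fun x => PySem.Chars.startswith x [' '] == true) with
          | nil => rw [hd] at hx; simp at hx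
          | cons y ys =>
            rw [hd] at hx; simp at hx; subst hx
            simpa using head_dropWhile_false hd
        have hlen' : (ls.dropWhile (fun x => PySem.Chars.startswith x [' '] == true)).length ≤ n := by
          have := ls.length_dropWhile_le (fun x => PySem.Chars.startswith x [' '] == true)
          simp at hlen; omega
        have ihrest := ih _ true hlen' (fun _ => hrest)
        rw [runsOf]
        simp only [hsw]
        conv_lhs => rw [← hsplit]
        simp only [auxA, hsw]
        rw [auxA_true_run _ _ hrun, ihrest]
        simp [auxB, List.append_assoc]
      | false =>
        have hsplit := List.takeWhile_append_dropWhile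
          (p := fun x => PySem.Chars.startswith x [' '] == false) (l := ls)
        have hrun : ∀ x ∈ ls.takeWhile (fun x => PySem.Chars.startswith x [' '] == false),
            PySem.Chars.startswith x [' '] = false := by
          intro x hx; simpa using List.mem_takeWhile_imp hx
        -- the recursive call enters with prev = false, so its hypothesis is vacuous
        have hlen' : (ls.dropWhile (fun x => PySem.Chars.startswith x [' '] == false)).length ≤ n := by
          have := ls.length_dropWhile_le (fun x => PySem.Chars.startswith x [' '] == false)
          simp at hlen; omega
        have ihrest := ih _ false hlen' (by intro h; cases h)
        rw [runsOf]
        simp only [hsw]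
        conv_lhs => rw [← hsplit]
        simp only [auxA, hsw]
        rw [auxA_false_run _ _ hrun, ihrest]
        cases b <;> simp [auxB, List.append_assoc]

-- ===== VERDICT (by name: the statement is the Claim_ definition above) =====
theorem parse_preformatted_py_spec : Claim_equal_parse_preformatted_py := by
  intro text _
  show parse_preformatted_py text = parse_preformatted_py_alt text
  simp only [parse_preformatted_py, parse_preformatted_py_alt]
  congr 1
  rw [join_nil_eq_flatten, foldB_eq, foldA_eq]
  simpa using main_eq _ _ false (Nat.le_refl _) (by intro h; cases h)
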